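-- pv_equiv track=rewrite | github.com/Nenavathnaresh/Python_DSA | DP-Problems/Medium/temple-offerings.py | offerings
-- ===== SOURCE A (Python) =====
-- def offerings(N, arr):
--     # Create an array to store the offerings with at least 1 offering for each temple
--     offerings = [1] * N
--
--     # Left to right pass: ensuring temples higher than their previous get more offerings
--     for i in range(1, N):
--         if arr[i] > arr[i - 1]:
--             offerings[i] = offerings[i - 1] + 1
--
--     # Right to left pass: ensuring temples higher than their next get more offerings
--     for i in range(N - 2, -1, -1):
--         if arr[i] > arr[i + 1]:
--             offerings[i] = max(offerings[i], offerings[i + 1] + 1)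
--
--     # Sum the total offerings to get the minimum number of offerings required
--     return sum(offerings)
-- ===== SOURCE B (Python) =====
-- def offerings(N, arr):
--     # Single-pass slope-counting ("candy") method: walk the heights once, tracking the
--     # length of the current ascent (up), current descent (down) and the offering height
--     # at the last peak; add the needed offerings incrementally, with no offerings array.
--     if N <= 0:
--         return 0
--     total = 1
--     up = down = peak = 0
--     for i in range(1, N):
--         if arr[i] > arr[i - 1]:
--             up += 1
--             down = 0
--             peak = up
--             total += up + 1
--         elif arr[i] == arr[i - 1]:
--             up = down = peak = 0
--             total += 1
--         else:
--             down += 1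
--             up = 0
--             total += down + (1 if down > peak else 0)
--     return total
-- ===== Notes on version B (the rewrite author's own statement) =====
-- stated objective: alternative
-- what changed: Replaces A's offerings array with two mutation passes (left-to-right bump, right-to-left max-merge, then sum) by the single-pass slope-counting (candy) method: one forward walk keeping only a running total and three counters (current ascent length, current descent length, offering height at the last peak), adding each temple's offerings incrementally and bumping the peak when a descent outgrows it.
import Mathlib
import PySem

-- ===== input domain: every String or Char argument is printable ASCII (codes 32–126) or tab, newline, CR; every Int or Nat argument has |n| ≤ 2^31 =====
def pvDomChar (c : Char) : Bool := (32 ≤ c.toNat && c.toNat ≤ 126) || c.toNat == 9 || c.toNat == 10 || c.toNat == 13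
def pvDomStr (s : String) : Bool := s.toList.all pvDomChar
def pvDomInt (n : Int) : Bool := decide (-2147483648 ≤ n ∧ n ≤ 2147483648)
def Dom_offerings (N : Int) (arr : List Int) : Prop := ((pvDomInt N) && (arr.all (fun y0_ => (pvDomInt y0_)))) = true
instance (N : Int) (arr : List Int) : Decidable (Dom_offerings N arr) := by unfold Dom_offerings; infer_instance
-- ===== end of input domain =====

-- B replaces A's two-pass offerings-array computation by the single-pass slope-counting
-- ("candy") method with O(1) state (total, up, down, peak); alternative algorithm, same time cost.


-- ===== PORT A =====
-- body of 'for i in range(1, N)': offerings[i] = offerings[i-1] + 1 when arr[i] > arr[i-1]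
def offeringsStep1 (arr : List Int) (o : List Int) (i : Int) : List Int :=
  if PySem.List.pyGetD arr i 0 > PySem.List.pyGetD arr (i - 1) 0 then
    PySem.List.pySetD o i (PySem.List.pyGetD o (i - 1) 0 + 1)
  else o

-- body of 'for i in range(N-2, -1, -1)': offerings[i] = max(offerings[i], offerings[i+1]+1)
def offeringsStep2 (arr : List Int) (o : List Int) (i : Int) : List Int :=
  if PySem.List.pyGetD arr i 0 > PySem.List.pyGetD arr (i + 1) 0 then
    PySem.List.pySetD o i (max (PySem.List.pyGetD o i 0) (PySem.List.pyGetD o (i + 1) 0 + 1))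
  else o

def offerings (N : Int) (arr : List Int) : Int :=
  -- offerings = [1] * N  (Python list repetition is empty for N ≤ 0)
  let offs := List.replicate N.toNat 1
  let offs1 := (PySem.List.pyRange 1 N 1).foldl (offeringsStep1 arr) offs
  let offs2 := (PySem.List.pyRange (N - 2) (-1) (-1)).foldl (offeringsStep2 arr) offs1
  offs2.sum

-- ===== PORT B =====
-- loop body of Source B: state is (total, up, down, peak); three branches on arr[i] vs arr[i-1]
def altStep (arr : List Int) (st : Int × Int × Int × Int) (i : Int) : Int × Int × Int × Int :=
  if PySem.List.pyGetD arr i 0 > PySem.List.pyGetD arr (i - 1) 0 then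
    -- up += 1; down = 0; peak = up; total += up + 1
    (st.1 + (st.2.1 + 1) + 1, st.2.1 + 1, 0, st.2.1 + 1)
  else if PySem.List.pyGetD arr i 0 = PySem.List.pyGetD arr (i - 1) 0 then
    -- up = down = peak = 0; total += 1
    (st.1 + 1, 0, 0, 0)
  else
    -- down += 1; up = 0; total += down + (1 if down > peak else 0)
    (st.1 + (st.2.2.1 + 1) + (if st.2.2.1 + 1 > st.2.2.2 then 1 else 0), 0, st.2.2.1 + 1, st.2.2.2)

def offerings_alt (N : Int) (arr : List Int) : Int :=
  if N ≤ 0 then 0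
  else ((PySem.List.pyRange 1 N 1).foldl (altStep arr) (1, 0, 0, 0)).1

-- ===== PRECONDITION & SPEC =====
-- Pre_ excludes N ≥ 2 with fewer than N heights (malformed input): there A raises
-- IndexError on arr[i]; B indexes the same positions and raises there too.
def Pre_offerings (N : Int) (arr : List Int) : Prop := N ≤ (arr.length : Int) ∨ N ≤ 1
instance (N : Int) (arr : List Int) : Decidable (Pre_offerings N arr) := by unfold Pre_offerings; infer_instance

def pvWitness_offerings : Int × List Int := (4, [1, 3, 2, 2])

def Spec_offerings (N : Int) (arr : List Int) (out : Int) : Prop := out = offerings_alt N arr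
instance (N : Int) (arr : List Int) (out : Int) : Decidable (Spec_offerings N arr out) := by unfold Spec_offerings; infer_instance

-- ===== CLAIM (what is proved, stated in full; the proofs are below) =====
def Claim_equal_offerings : Prop := ∀ (N : Int) (arr : List Int), Dom_offerings N arr → Pre_offerings N arr → Spec_offerings N arr (offerings N arr)

-- ===== LEMMAS AND PROOFS =====

-- length of the strictly-increasing run of a ending at index k (1-based count)
def incV (a : List Int) : Nat → Int
  | 0 => 1
  | k + 1 => if a.getD (k + 1) 0 > a.getD k 0 then incV a k + 1 else 1

-- length of the strictly-decreasing run of a (of length n) starting at index i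
def decV (a : List Int) (n : Nat) (i : Nat) : Int :=
  if h : i + 1 < n ∧ a.getD i 0 > a.getD (i + 1) 0 then decV a n (i + 1) + 1 else 1
termination_by n - i
decreasing_by omega

-- length (1-based) of the strictly-decreasing run of a ending at index k
def decE (a : List Int) : Nat → Nat
  | 0 => 1
  | k + 1 => if a.getD k 0 > a.getD (k + 1) 0 then decE a k + 1 else 1

-- strictly-decreasing run length starting at i, bounded only by the list length
def dFree (a : List Int) (i : Nat) : Int :=
  if h : i + 1 < a.length ∧ a.getD i 0 > a.getD (i + 1) 0 then dFree a (i + 1) + 1 else 1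
termination_by a.length - i
decreasing_by omega

-- a strictly decreases from index i through index k
def Chain (a : List Int) (i k : Nat) : Prop :=
  ∀ j, i ≤ j → j < k → a.getD j 0 > a.getD (j + 1) 0

lemma one_le_incV (a : List Int) (k : Nat) : 1 ≤ incV a k := by
  cases k with
  | zero => simp [incV]
  | succ k => unfold incV; split <;> [have := one_le_incV a k; skip] <;> omega

lemma one_le_decV (a : List Int) (n i : Nat) : 1 ≤ decV a n i := by
  unfold decV
  split
  · have := one_le_decV a n (i + 1); omega
  · omega
termination_by n - i
decreasing_by omega

lemma one_le_dFree (a : List Int) (i : Nat) : 1 ≤ dFree a i := by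
  unfold dFree
  split
  · have := one_le_dFree a (i + 1); omega
  · omega
termination_by a.length - i
decreasing_by omega

lemma one_le_decE (a : List Int) (k : Nat) : 1 ≤ decE a k := by
  cases k with
  | zero => simp [decE]
  | succ k => unfold decE; split <;> [have := one_le_decE a k; skip] <;> omega

lemma decE_le (a : List Int) (k : Nat) : decE a k ≤ k + 1 := by
  cases k with
  | zero => simp [decE]
  | succ k => unfold decE; split <;> [have := decE_le a k; skip] <;> omega

-- decV is the bounded version of dFree
lemma decV_min (a : List Int) (n i : Nat) (h1 : i < n) (h2 : n ≤ a.length) :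
    decV a n i = min ((n : Int) - i) (dFree a i) := by
  rw [decV]
  by_cases h : i + 1 < n ∧ a.getD i 0 > a.getD (i + 1) 0
  · rw [dif_pos h]
    have hf : dFree a i = dFree a (i + 1) + 1 := by
      rw [dFree, dif_pos ⟨by omega, h.2⟩]
    rw [decV_min a n (i + 1) h.1 h2, hf]
    push_cast
    omega
  · rw [dif_neg h]
    by_cases hb : i + 1 < n
    · have hgt : ¬ a.getD i 0 > a.getD (i + 1) 0 := fun hg => h ⟨hb, hg⟩
      have hf : dFree a i = 1 := by
        rw [dFree, dif_neg]
        rintro ⟨-, hg⟩; exact hgt hg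
      rw [hf]; omega
    · have := one_le_dFree a i
      omega
termination_by n - i
decreasing_by omega

-- decE counts exactly the maximal chains ending at k
lemma decE_chain (a : List Int) (k : Nat) : ∀ i, i ≤ k → (Chain a i k ↔ k - i < decE a k) := by
  induction k with
  | zero =>
    intro i hi
    have : i = 0 := by omega
    subst this
    exact ⟨fun _ => by simp [decE], fun _ j hj1 hj2 => absurd hj2 (by omega)⟩
  | succ k ih =>
    intro i hi
    rw [show decE a (k + 1) = if a.getD k 0 > a.getD (k + 1) 0 then decE a k + 1 else 1 from rfl]
    by_cases hik : i ≤ k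
    · by_cases hg : a.getD k 0 > a.getD (k + 1) 0
      · rw [if_pos hg]
        have hch : Chain a i (k + 1) ↔ Chain a i k := by
          constructor
          · intro h j h1 h2; exact h j h1 (by omega)
          · intro h j h1 h2
            rcases Nat.lt_or_ge j k with h' | h'
            · exact h j h1 h'
            · have hj : j = k := by omega
              subst hj; exact hg
        rw [hch, ih i hik]; omega
      · rw [if_neg hg]
        constructor
        · intro h; exact absurd (h k hik (by omega)) hg
        · intro h; omega
    · have : i = k + 1 := by omega
      subst this
      constructor
      · intro _
        split
        · have := one_le_decE a k; omega
        · omega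
      · intro _ j h1 h2; omega

-- dFree exceeds k - i exactly when a strictly decreases from i through k
lemma dFree_gt_iff (a : List Int) (i k : Nat) (hik : i ≤ k) (hk : k < a.length) :
    ((k : Int) - i < dFree a i) ↔ Chain a i k := by
  by_cases he : i = k
  · subst he
    constructor
    · intro _ j h1 h2; omega
    · intro _
      have := one_le_dFree a i; omega
  · have hlt : i < k := by omega
    constructor
    · intro h
      have h2 : 2 ≤ dFree a i := by omega
      have hcond : i + 1 < a.length ∧ a.getD i 0 > a.getD (i + 1) 0 := by
        by_contra hc
        rw [dFree, dif_neg hc] at h2; omega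
      have hf : dFree a i = dFree a (i + 1) + 1 := by rw [dFree, dif_pos hcond]
      have hch : Chain a (i + 1) k := by
        refine (dFree_gt_iff a (i + 1) k (by omega) hk).mp ?_
        push_cast
        omega
      intro j h1 h2
      rcases Nat.eq_or_lt_of_le h1 with h' | h'
      · rw [← h']; exact hcond.2
      · exact hch j (by omega) h2
    · intro hch
      have hcond : i + 1 < a.length ∧ a.getD i 0 > a.getD (i + 1) 0 :=
        ⟨by omega, hch i le_rfl hlt⟩
      rw [dFree, dif_pos hcond]
      have := (dFree_gt_iff a (i + 1) k (by omega) hk).mpr (fun j h1 h2 => hch j (by omega) h2)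
      push_cast at this ⊢
      omega
termination_by k - i
decreasing_by all_goals omega

lemma sum_step_indicator (s : Nat) : ∀ k : Nat, ∑ i ∈ Finset.range k, (if i < s then (0 : Int) else 1) = ((k - s : Nat) : Int) := by
  intro k
  induction k with
  | zero => simp
  | succ k ih =>
    rw [Finset.sum_range_succ, ih]
    split_ifs with h
    · have : k + 1 - s = 0 := by omega
      have h2 : k - s = 0 := by omega
      rw [this, h2]; simp
    · have : k + 1 - s = (k - s) + 1 := by omega
      rw [this]; push_cast; ring

lemma sum_map_range (g : Nat → Int) (n : Nat) : ((List.range n).map g).sum = ∑ i ∈ Finset.range n, g i := by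
  induction n with
  | zero => simp
  | succ n ih => simp [List.range_succ, Finset.sum_range_succ, ih]

-- ====== the A-side characterisation (two passes = pointwise max of run lengths) ======

lemma left_pass (arr : List Int) (n : Nat) (hn1 : 1 ≤ n) (hlen : n ≤ arr.length) (k : Nat)
    (hk1 : 1 ≤ k) (hkn : k ≤ n) :
    (PySem.List.pyRange 1 (k : Int) 1).foldl (offeringsStep1 arr) (List.replicate n 1)
      = (List.range k).map (incV arr) ++ List.replicate (n - k) (1 : Int) := by
  induction k with
  | zero => omega
  | succ k ih =>
    rcases Nat.eq_or_lt_of_le hk1 with h1 | h1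
    · have hk0 : k = 0 := by omega
      subst hk0
      rw [PySem.List.pyRange_one_eq_nil (by norm_num), List.foldl_nil]
      have : n = (n - 1) + 1 := by omega
      rw [this]
      simp [List.replicate_succ, incV]
    · have hk1' : 1 ≤ k := by omega
      rw [show ((k + 1 : Nat) : Int) = (k : Int) + 1 by omega,
          PySem.List.pyRange_one_succ_right (by exact_mod_cast hk1'),
          List.foldl_append, ih hk1' (by omega), List.foldl_cons, List.foldl_nil]
      have hklen : k < arr.length := by omega
      have hgd1 : PySem.List.pyGetD arr (k : Int) 0 = arr.getD k 0 := by
        simp [PySem.List.pyGetD_natCast]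
      have hgd2 : PySem.List.pyGetD arr ((k : Int) - 1) 0 = arr.getD (k - 1) 0 := by
        rw [show ((k : Int) - 1) = ((k - 1 : Nat) : Int) by omega]
        simp [PySem.List.pyGetD_natCast]
      have hMlen : ((List.range k).map (incV arr)).length = k := by simp
      have hrep : List.replicate (n - k) (1 : Int) = 1 :: List.replicate (n - (k + 1)) 1 := by
        rw [show n - k = (n - (k + 1)) + 1 by omega, List.replicate_succ]
      have hoget : ((List.range k).map (incV arr) ++ List.replicate (n - k) (1 : Int)).getD (k - 1) 0
          = incV arr (k - 1) := by
        rw [List.getD_eq_getElem?_getD, List.getElem?_append_left (by omega)]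
        simp [List.getElem?_map, List.getElem?_range (show k - 1 < k by omega)]
      have hinc : incV arr k = if arr.getD k 0 > arr.getD (k - 1) 0 then incV arr (k - 1) + 1 else 1 := by
        rw [show k = (k - 1) + 1 by omega, incV]
        simp only [show k - 1 + 1 = k by omega]
      rw [offeringsStep1, hgd1, hgd2]
      by_cases hc : arr.getD k 0 > arr.getD (k - 1) 0
      · rw [if_pos hc]
        have : PySem.List.pyGetD ((List.range k).map (incV arr) ++ List.replicate (n - k) (1 : Int)) ((k : Int) - 1) 0
            = incV arr (k - 1) := by
          rw [show ((k : Int) - 1) = ((k - 1 : Nat) : Int) by omega]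
          simp only [PySem.List.pyGetD_natCast]
          exact hoget
        rw [this]
        simp only [PySem.List.pySetD_natCast]
        rw [List.set_append, if_neg (by omega), hMlen, Nat.sub_self, hrep, List.set_cons_zero]
        rw [List.range_succ, List.map_append, List.map_cons, List.map_nil, hinc, if_pos hc]
        simp
      · rw [if_neg hc]
        rw [List.range_succ, List.map_append, List.map_cons, List.map_nil, hinc, if_neg hc, hrep]
        simp

lemma right_pass (arr : List Int) (n : Nat) (hn1 : 1 ≤ n) (hlen : n ≤ arr.length) (j : Nat)
    (hj : j ≤ n - 1) :
    (PySem.List.pyRange ((j : Int) - 1) (-1) (-1)).foldl (offeringsStep2 arr)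
        ((List.range n).map (fun i => if i < j then incV arr i else max (incV arr i) (decV arr n i)))
      = (List.range n).map (fun i => max (incV arr i) (decV arr n i)) := by
  induction j with
  | zero =>
    rw [show ((0 : Nat) : Int) - 1 = (-1 : Int) by norm_num,
        PySem.List.pyRange_neg_one_eq_nil (by norm_num), List.foldl_nil]
    simp
  | succ j ih =>
    have hjn : j + 1 < n := by omega
    have hj1len : j + 1 < arr.length := by omega
    have hjlen : j < arr.length := by omega
    rw [show ((j + 1 : Nat) : Int) - 1 = (j : Int) by omega,
        PySem.List.pyRange_neg_one_cons (by omega), List.foldl_cons]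
    have hgd1 : PySem.List.pyGetD arr (j : Int) 0 = arr.getD j 0 := by
      simp [PySem.List.pyGetD_natCast]
    have hgd2 : PySem.List.pyGetD arr ((j : Int) + 1) 0 = arr.getD (j + 1) 0 := by
      rw [show ((j : Int) + 1) = ((j + 1 : Nat) : Int) by omega, PySem.List.pyGetD_natCast]
    have hogetj : ∀ (g : Nat → Int) (m : Nat), m < n →
        ((List.range n).map g).getD m 0 = g m := by
      intro g m hm
      rw [List.getD_eq_getElem?_getD]
      simp [List.getElem?_map, List.getElem?_range hm]
    have key : offeringsStep2 arr
        ((List.range n).map (fun i => if i < j + 1 then incV arr i else max (incV arr i) (decV arr n i))) (j : Int)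
        = (List.range n).map (fun i => if i < j then incV arr i else max (incV arr i) (decV arr n i)) := by
      rw [offeringsStep2, hgd1, hgd2]
      by_cases hc : arr.getD j 0 > arr.getD (j + 1) 0
      · rw [if_pos hc]
        have hvj : PySem.List.pyGetD ((List.range n).map (fun i => if i < j + 1 then incV arr i else max (incV arr i) (decV arr n i))) (j : Int) 0 = incV arr j := by
          simp only [PySem.List.pyGetD_natCast]
          rw [hogetj _ j (by omega)]
          simp
        have hvj1 : PySem.List.pyGetD ((List.range n).map (fun i => if i < j + 1 then incV arr i else max (incV arr i) (decV arr n i))) ((j : Int) + 1) 0 = max (incV arr (j + 1)) (decV arr n (j + 1)) := by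
          rw [show ((j : Int) + 1) = ((j + 1 : Nat) : Int) by omega]
          simp only [PySem.List.pyGetD_natCast]
          rw [hogetj _ (j + 1) hjn]
          simp
        have hinc1 : incV arr (j + 1) = 1 := by
          rw [incV, if_neg (by omega)]
        have hdec : decV arr n j = decV arr n (j + 1) + 1 := by
          rw [decV, dif_pos ⟨hjn, hc⟩]
        have hd1 : 1 ≤ decV arr n (j + 1) := one_le_decV arr n (j + 1)
        rw [hvj, hvj1, hinc1]
        simp only [PySem.List.pySetD_natCast]
        have hmax : max 1 (decV arr n (j + 1)) = decV arr n (j + 1) := max_eq_right hd1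
        rw [hmax, ← hdec]
        apply List.ext_getElem (by simp)
        intro i h1 h2
        rw [List.getElem_set]
        have hi : i < n := by simpa using h2
        simp only [List.getElem_map, List.getElem_range]
        by_cases hij : j = i
        · subst hij; rw [if_pos rfl, if_neg (by omega)]
        · rw [if_neg hij]
          rcases Nat.lt_trichotomy i j with h | h | h
          · rw [if_pos (by omega), if_pos h]
          · omega
          · rw [if_neg (by omega), if_neg (by omega)]
      · rw [if_neg hc]
        have hdec1 : decV arr n j = 1 := by
          rw [decV, dif_neg]
          rintro ⟨-, h⟩; exact hc h
        refine List.map_congr_left ?_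
        intro i hi
        rcases Nat.lt_trichotomy i j with h | h | h
        · simp [h, Nat.lt_succ_of_lt h]
        · subst h
          rw [if_pos (by omega), if_neg (by omega), hdec1]
          have := one_le_incV arr i
          omega
        · rw [if_neg (by omega), if_neg (by omega)]
    rw [key]
    exact ih (by omega)

-- ====== the B-side invariant (single pass = running sum of the same pointwise maxima) ======

lemma alt_fold (arr : List Int) (n : Nat) (hlen : n ≤ arr.length) :
    ∀ k, 1 ≤ k → k ≤ n →
    (PySem.List.pyRange 1 (k : Int) 1).foldl (altStep arr) (1, 0, 0, 0)
      = (∑ i ∈ Finset.range k, max (incV arr i) (decV arr k i),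
         incV arr (k - 1) - 1,
         ((decE arr (k - 1) : Nat) : Int) - 1,
         incV arr (k - decE arr (k - 1)) - 1) := by
  intro k hk1
  induction k, hk1 using Nat.le_induction with
  | base =>
    intro _
    rw [PySem.List.pyRange_one_eq_nil (by norm_num), List.foldl_nil]
    have hdv : decV arr 1 0 = 1 := by rw [decV, dif_neg]; rintro ⟨h, -⟩; omega
    simp [incV, decE, hdv]
  | succ k hk1 ih =>
    intro hkn
    simp only [Nat.add_sub_cancel]
    have hkn' : k ≤ n := by omega
    have hklen : k < arr.length := by omega
    rw [show ((k + 1 : Nat) : Int) = (k : Int) + 1 by push_cast; ring,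
        PySem.List.pyRange_one_succ_right (by exact_mod_cast hk1),
        List.foldl_append, ih hkn', List.foldl_cons, List.foldl_nil]
    -- abbreviations
    set x := arr.getD k 0 with hx
    set p := arr.getD (k - 1) 0 with hp
    have hgd1 : PySem.List.pyGetD arr (k : Int) 0 = x := by
      simp [PySem.List.pyGetD_natCast, hx]
    have hgd2 : PySem.List.pyGetD arr ((k : Int) - 1) 0 = p := by
      rw [show ((k : Int) - 1) = ((k - 1 : Nat) : Int) by omega]
      simp [PySem.List.pyGetD_natCast, hp]
    have hinc : incV arr k = if x > p then incV arr (k - 1) + 1 else 1 := by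
      rw [show k = (k - 1) + 1 by omega, incV]
      simp only [show k - 1 + 1 = k by omega, ← hx, ← hp]
    have hdecE : decE arr k = if p > x then decE arr (k - 1) + 1 else 1 := by
      rw [show k = (k - 1) + 1 by omega, decE]
      simp only [show k - 1 + 1 = k by omega, ← hx, ← hp]
    set d : Nat := decE arr (k - 1) with hd
    have hd1 : 1 ≤ d := one_le_decE arr (k - 1)
    have hdk : d ≤ k := by have := decE_le arr (k - 1); omega
    set s : Nat := k - d with hs
    -- last element of the new prefix contributes max(incV k, 1)
    have hdvlast : decV arr (k + 1) k = 1 := by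
      rw [decV, dif_neg]; rintro ⟨h, -⟩; omega
    have hsum_succ : ∑ i ∈ Finset.range (k + 1), max (incV arr i) (decV arr (k + 1) i)
        = (∑ i ∈ Finset.range k, max (incV arr i) (decV arr (k + 1) i)) + max (incV arr k) 1 := by
      rw [Finset.sum_range_succ, hdvlast]
    -- chain criterion relative to the new prefix end k
    have hkey : ∀ i, i < k → (((k : Int) - i < dFree arr i) ↔ Chain arr i k) :=
      fun i hi => dFree_gt_iff arr i k (by omega) hklen
    rw [altStep, hgd1, hgd2]
    by_cases hun : x > p
    · -- ascent
      rw [if_pos hun]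
      have hnoch : ∀ i, i < k → dFree arr i ≤ (k : Int) - i := by
        intro i hi
        by_contra hcon
        have hch := (hkey i hi).mp (by omega)
        have := hch (k - 1) (by omega) (by omega)
        rw [show k - 1 + 1 = k by omega] at this
        exact absurd hun (by omega)
      have hsame : ∀ i ∈ Finset.range k, max (incV arr i) (decV arr (k + 1) i)
          = max (incV arr i) (decV arr k i) := by
        intro i hi
        have hik : i < k := Finset.mem_range.mp hi
        rw [decV_min arr (k + 1) i (by omega) (by omega), decV_min arr k i hik (by omega)]
        have := hnoch i hik
        have := one_le_dFree arr i
        push_cast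
        omega
      have hincv : incV arr k = incV arr (k - 1) + 1 := by rw [hinc, if_pos hun]
      have hdecEv : decE arr k = 1 := by
        rw [hdecE, if_neg (by omega)]
      refine Prod.ext ?_ (Prod.ext ?_ (Prod.ext ?_ ?_)) <;> simp only
      · rw [hsum_succ, Finset.sum_congr rfl hsame]
        have := one_le_incV arr k
        omega
      · omega
      · rw [hdecEv]; simp
      · rw [show k + 1 - decE arr k = k by rw [hdecEv]; omega]
        omega
    · rw [if_neg hun]
      by_cases heq : x = p
      · -- plateau
        rw [if_pos heq]
        have hnoch : ∀ i, i < k → dFree arr i ≤ (k : Int) - i := by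
          intro i hi
          by_contra hcon
          have hch := (hkey i hi).mp (by omega)
          have := hch (k - 1) (by omega) (by omega)
          rw [show k - 1 + 1 = k by omega] at this
          omega
        have hsame : ∀ i ∈ Finset.range k, max (incV arr i) (decV arr (k + 1) i)
            = max (incV arr i) (decV arr k i) := by
          intro i hi
          have hik : i < k := Finset.mem_range.mp hi
          rw [decV_min arr (k + 1) i (by omega) (by omega), decV_min arr k i hik (by omega)]
          have := hnoch i hik
          have := one_le_dFree arr i
          push_cast
          omega
        have hincv : incV arr k = 1 := by rw [hinc, if_neg hun]
        have hdecEv : decE arr k = 1 := by rw [hdecE, if_neg (by omega)]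
        refine Prod.ext ?_ (Prod.ext ?_ (Prod.ext ?_ ?_)) <;> simp only
        · rw [hsum_succ, Finset.sum_congr rfl hsame, hincv]
          omega
        · rw [hincv]; simp
        · rw [hdecEv]; simp
        · rw [show k + 1 - decE arr k = k by rw [hdecEv]; omega, hincv]; simp
      · -- descent
        rw [if_neg heq]
        have hdown : p > x := by omega
        have hincv : incV arr k = 1 := by rw [hinc, if_neg hun]
        have hdecEv : decE arr k = d + 1 := by rw [hdecE, if_pos hdown]
        -- Chain arr i k ↔ s ≤ i   (via decE at k)
        have hchain_s : ∀ i, i ≤ k → (Chain arr i k ↔ s ≤ i) := by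
          intro i hi
          rw [decE_chain arr k i hi, hdecEv]
          omega
        have hchs : Chain arr s k := (hchain_s s (by omega)).mpr le_rfl
        have hinc_mid : ∀ i, s < i → i < k → incV arr i = 1 := by
          intro i h1 h2
          have hgt : arr.getD (i - 1) 0 > arr.getD i 0 := by
            have := hchs (i - 1) (by omega) (by omega)
            rwa [show i - 1 + 1 = i by omega] at this
          rw [show i = (i - 1) + 1 by omega, incV]
          simp only [show i - 1 + 1 = i by omega]
          rw [if_neg (by omega)]
        set P : Int := incV arr s with hP
        set c : Int := if P ≤ (d : Int) then 1 else 0 with hc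
        have hpoint : ∀ i ∈ Finset.range k,
            max (incV arr i) (decV arr (k + 1) i)
              = max (incV arr i) (decV arr k i)
                + ((if i < s then (0 : Int) else 1) + (if i = s then c - 1 else 0)) := by
          intro i hi
          have hik : i < k := Finset.mem_range.mp hi
          rw [decV_min arr (k + 1) i (by omega) (by omega), decV_min arr k i hik (by omega)]
          rcases Nat.lt_trichotomy i s with h | h | h
          · -- before the descending run: unchanged
            have hnc : ¬ Chain arr i k := by
              rw [hchain_s i (by omega)]; omega
            have hle : dFree arr i ≤ (k : Int) - i := by
              by_contra hcon
              exact hnc ((hkey i hik).mp (by omega))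
            rw [if_pos h, if_neg (by omega)]
            have := one_le_dFree arr i
            push_cast
            omega
          · -- the peak
            subst h
            have hgt : (k : Int) - s < dFree arr s := (hkey s hik).mpr hchs
            have hks : (k : Int) - s = (d : Int) := by omega
            rw [if_neg (by omega), if_pos rfl]
            rw [hks] at hgt ⊢
            rw [show ((k + 1 : Nat) : Int) - (s : Int) = (d : Int) + 1 by push_cast; omega]
            rw [min_eq_left (by omega), min_eq_left (by omega), ← hP]
            by_cases hPd : P ≤ (d : Int)
            · rw [hc, if_pos hPd]; omega
            · rw [hc, if_neg hPd]; omega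
          · -- inside the descending run
            have hch : Chain arr i k := (hchain_s i (by omega)).mpr (by omega)
            have hgt : (k : Int) - i < dFree arr i := (hkey i hik).mpr hch
            rw [hinc_mid i h hik, if_neg (by omega), if_neg (by omega)]
            push_cast
            omega
        have hsk : s < k := by omega
        have hsum2 : ∑ i ∈ Finset.range k, max (incV arr i) (decV arr (k + 1) i)
            = (∑ i ∈ Finset.range k, max (incV arr i) (decV arr k i)) + ((k : Int) - s) + (c - 1) := by
          rw [Finset.sum_congr rfl hpoint, Finset.sum_add_distrib, Finset.sum_add_distrib,
              sum_step_indicator s k, Finset.sum_ite_eq' (Finset.range k) s (fun _ => c - 1)]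
          rw [if_pos (Finset.mem_range.mpr hsk)]
          omega
        refine Prod.ext ?_ (Prod.ext ?_ (Prod.ext ?_ ?_)) <;> simp only
        · rw [hsum_succ, hsum2, hincv]
          have hdpk : ((d : Int) - 1 + 1 > P - 1) ↔ (P ≤ (d : Int)) := by omega
          by_cases hPd : P ≤ (d : Int)
          · rw [if_pos (hdpk.mpr hPd), hc, if_pos hPd]
            push_cast
            omega
          · rw [if_neg (fun h => hPd (hdpk.mp h)), hc, if_neg hPd]
            push_cast
            omega
        · rw [hincv]; simp
        · rw [hdecEv]; push_cast; ring
        · rw [show k + 1 - decE arr k = s by rw [hdecEv]; omega, ← hP]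

lemma offerings_def (N : Int) (arr : List Int) :
    offerings N arr
      = ((PySem.List.pyRange (N - 2) (-1) (-1)).foldl (offeringsStep2 arr)
          ((PySem.List.pyRange 1 N 1).foldl (offeringsStep1 arr)
            (List.replicate N.toNat 1))).sum := rfl

lemma offerings_alt_def (N : Int) (arr : List Int) :
    offerings_alt N arr
      = if N ≤ 0 then 0
        else ((PySem.List.pyRange 1 N 1).foldl (altStep arr) (1, 0, 0, 0)).1 := rfl

-- ===== VERDICT (by name: the statements are the Claim_ definitions above) =====
theorem offerings_spec : Claim_equal_offerings := by
  unfold Claim_equal_offerings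
  intro N arr _ hpre
  unfold Spec_offerings
  unfold Pre_offerings at hpre
  rw [offerings_def, offerings_alt_def]
  by_cases hN : N ≤ 0
  · rw [if_pos hN,
        PySem.List.pyRange_one_eq_nil (by omega), List.foldl_nil,
        PySem.List.pyRange_neg_one_eq_nil (by omega), List.foldl_nil,
        Int.toNat_of_nonpos hN]
    simp
  · rw [if_neg hN]
    by_cases hN1 : N = 1
    · subst hN1
      rw [PySem.List.pyRange_one_eq_nil (by norm_num), List.foldl_nil, List.foldl_nil,
          PySem.List.pyRange_neg_one_eq_nil (by norm_num), List.foldl_nil]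
      simp
    · have hN2 : 2 ≤ N := by omega
      have hlenN : N ≤ (arr.length : Int) := by
        rcases hpre with h | h
        · exact h
        · omega
      set n := N.toNat with hn
      have hNn : N = (n : Int) := by omega
      have hn1 : 1 ≤ n := by omega
      have hlen : n ≤ arr.length := by omega
      -- A side
      have hA1 := left_pass arr n hn1 hlen n hn1 le_rfl
      rw [Nat.sub_self, List.replicate_zero, List.append_nil] at hA1
      have hstart : (List.range n).map (incV arr)
          = (List.range n).map (fun i => if i < n - 1 then incV arr i
              else max (incV arr i) (decV arr n i)) := by
        refine List.map_congr_left ?_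
        intro i hi
        have hi' : i < n := List.mem_range.mp hi
        by_cases hilt : i < n - 1
        · rw [if_pos hilt]
        · rw [if_neg hilt]
          have hdec : decV arr n i = 1 := by
            rw [decV, dif_neg]; rintro ⟨h1, -⟩; omega
          rw [hdec, max_eq_left (one_le_incV arr i)]
      have hA2 := right_pass arr n hn1 hlen (n - 1) le_rfl
      rw [show ((n - 1 : Nat) : Int) - 1 = N - 2 by omega] at hA2
      rw [hNn, hA1, hstart, ← hNn, hA2]
      -- B side
      have hB := alt_fold arr n hlen n hn1 le_rfl
      rw [hNn, hB]
      exact sum_map_range (fun i => max (incV arr i) (decV arr n i)) n
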